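-- pv_equiv track=rewrite | github.com/carrdelling/AdventOfCode2015 | day11/silver.py | next_pass
-- ===== SOURCE A (Python) =====
-- def next_pass(password):
--
--     rev = list(password)[::-1]
--
--     for i, c in enumerate(rev):
--         if c == 'z':
--             rev[i] = 'a'
--         elif c == 'h':
--             rev[i] = 'j'
--             break
--         elif c == 'k':
--             rev[i] = 'm'
--             break
--         elif c == 'n':
--             rev[i] = 'p'
--             break
--         else:
--             rev[i] = chr(ord(c) + 1)
--             break
--
--     return ''.join(rev[::-1])
-- ===== SOURCE B (Python) =====
-- def next_pass(password):
--     # Strip the trailing run of carrying characters in one rstrip step, bump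
--     # the last remaining character once, and append the carried characters back.
--     core = password.rstrip('z')
--     n_z = len(password) - len(core)
--     if not core:
--         return 'a' * n_z
--     c = core[-1]
--     if c == 'h':
--         nc = 'j'
--     elif c == 'k':
--         nc = 'm'
--     elif c == 'n':
--         nc = 'p'
--     else:
--         nc = chr(ord(c) + 1)
--     return core[:-1] + nc + 'a' * n_z
-- ===== Notes on version B (the rewrite author's own statement) =====
-- stated objective: simpler
-- what changed: Replaces A's reversed-list scan with per-index mutation and break by a direct decomposition: strip the trailing run of carrying characters in one rstrip step, bump the last remaining character, and append the carried characters back.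
import Mathlib
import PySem

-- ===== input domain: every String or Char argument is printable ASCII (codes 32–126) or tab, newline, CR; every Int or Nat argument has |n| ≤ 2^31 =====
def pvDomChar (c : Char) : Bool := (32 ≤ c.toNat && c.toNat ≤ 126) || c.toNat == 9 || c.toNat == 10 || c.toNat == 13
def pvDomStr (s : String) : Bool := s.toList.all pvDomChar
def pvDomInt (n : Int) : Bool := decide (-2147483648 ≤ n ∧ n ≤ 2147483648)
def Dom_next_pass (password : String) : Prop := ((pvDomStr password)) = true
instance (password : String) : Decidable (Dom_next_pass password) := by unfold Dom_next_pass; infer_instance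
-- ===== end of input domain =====

-- B strips all trailing 'z's at once instead of A's reversed carry loop; objective: simpler.

-- ===== PORT A =====
-- the for-loop over the reversed list: 'z' carries on, any other branch breaks
def nextPassLoopA : List Char → List Char
  | [] => []
  | c :: rest =>
    if c = 'z' then 'a' :: nextPassLoopA rest
    else if c = 'h' then 'j' :: rest
    else if c = 'k' then 'm' :: rest
    else if c = 'n' then 'p' :: rest
    else Char.ofNat (c.toNat + 1) :: rest

def next_pass (password : String) : String :=
  String.ofList ((nextPassLoopA password.toList.reverse).reverse)

-- ===== PORT B =====
def next_pass_alt (password : String) : String :=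
  let l := password.toList
  let core := (l.reverse.dropWhile (fun c => c == 'z')).reverse   -- rstrip('z')
  let nz := l.length - core.length
  if core = [] then String.ofList (List.replicate nz 'a')
  else
    let c := core.getLastD 'a'   -- core[-1]; core is nonempty here
    let nc := if c = 'h' then 'j' else if c = 'k' then 'm' else if c = 'n' then 'p'
              else Char.ofNat (c.toNat + 1)
    String.ofList (core.dropLast ++ [nc] ++ List.replicate nz 'a')

-- ===== PRECONDITION & SPEC =====
def Spec_next_pass (password : String) (out : String) : Prop := out = next_pass_alt password
instance (password : String) (out : String) : Decidable (Spec_next_pass password out) := by unfold Spec_next_pass; infer_instance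

-- ===== CLAIM (what is proved, stated in full; the proofs are below) =====
def Claim_equal_next_pass : Prop := ∀ (password : String), Dom_next_pass password → Spec_next_pass password (next_pass password)

-- ===== LEMMAS AND PROOFS =====

def pvBump (c : Char) : Char :=
  if c = 'h' then 'j' else if c = 'k' then 'm' else if c = 'n' then 'p'
  else Char.ofNat (c.toNat + 1)

theorem nextPassLoopA_eq (r : List Char) :
    nextPassLoopA r =
      List.replicate (r.takeWhile (fun c => c == 'z')).length 'a' ++
        (match r.dropWhile (fun c => c == 'z') with
          | [] => []
          | c :: rest => pvBump c :: rest) := by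
  induction r with
  | nil => simp [nextPassLoopA]
  | cons c rest ih =>
    by_cases h : c = 'z'
    · simp [nextPassLoopA, h, List.takeWhile, List.dropWhile, ih, List.replicate_succ]
    · have hb : (c == 'z') = false := by simp [h]
      simp [nextPassLoopA, h, hb, List.takeWhile, List.dropWhile, pvBump]
      split_ifs <;> rfl

-- ===== VERDICT (by name: the statement is the Claim_ definition above) =====
theorem next_pass_spec : Claim_equal_next_pass := by
  intro password _
  unfold Spec_next_pass next_pass next_pass_alt
  set l := password.toList with hl
  have hsplit := List.takeWhile_append_dropWhile (p := fun c => c == 'z') (l := l.reverse)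
  cases hdrop : l.reverse.dropWhile (fun c => c == 'z') with
  | nil =>
    have htake : (l.reverse.takeWhile (fun c => c == 'z')) = l.reverse := by
      rw [hdrop] at hsplit; simpa using hsplit
    simp [nextPassLoopA_eq, hdrop, htake]
  | cons c rest =>
    have hlen : l.length = (l.reverse.takeWhile (fun c => c == 'z')).length + (rest.length + 1) := by
      have := congrArg List.length hsplit
      simp [hdrop] at this
      simpa using this.symm
    have hne : (c :: rest).reverse ≠ [] := by simp
    simp only [nextPassLoopA_eq, hdrop, hne]
    have h1 : ((c :: rest).reverse).getLastD 'a' = c := by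
      simp [List.reverse_cons]
    have h2 : ((c :: rest).reverse).dropLast = rest.reverse := by
      simp [List.reverse_cons]
    rw [h1, h2]
    have h3 : l.length - ((c :: rest).reverse).length =
        (l.reverse.takeWhile (fun c => c == 'z')).length := by
      simp; omega
    rw [h3]
    congr 1
    simp [pvBump, List.reverse_append]
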